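-- pv_equiv track=rewrite | github.com/hanzmyco/ST | Alibaba/Word Ladder 2.py | dfsprint
-- ===== SOURCE A (Python) =====
-- import copy
--
-- def dfsprint(child,father_dic,output_list,begin_word):
--     for ite in output_list:
--         ite.append(child)
--     return_list=[]
--     if child!=begin_word:
--         for father in father_dic[child]:
--                 new_output=copy.deepcopy(output_list)
--                 one_list=dfsprint(father,father_dic,new_output,begin_word)
--                 return_list.extend(one_list)
--     else:
--         return_list.extend(output_list)
--     return return_list
-- ===== SOURCE B (Python) =====
-- def _tails(child, father_dic, begin_word):
--     # All suffix paths [father, ..., begin_word] below 'child', father-major (DFS) order.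
--     result = []
--     for father in father_dic[child]:
--         if father == begin_word:
--             result.append([father])
--         else:
--             for t in _tails(father, father_dic, begin_word):
--                 result.append([father] + t)
--     return result
--
-- def dfsprint(child, father_dic, output_list, begin_word):
--     # Same observable mutation as A: append child to every inner list of output_list.
--     for ite in output_list:
--         ite.append(child)
--     if child == begin_word:
--         return list(output_list)
--     return [prefix + tail for tail in _tails(child, father_dic, begin_word)
--                           for prefix in output_list]
-- ===== Notes on version B (the rewrite author's own statement) =====
-- stated objective: simpler
-- what changed: B separates the recursion into a pure tail-path enumerator (returning suffix paths [father,...,begin_word]) and a single cross-product comprehension with the prefixes, eliminating A's per-branch copy.deepcopy of the whole prefix list; equivalence is about the return value (both perform the same visible append-mutation of output_list's inner lists).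
import Mathlib
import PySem

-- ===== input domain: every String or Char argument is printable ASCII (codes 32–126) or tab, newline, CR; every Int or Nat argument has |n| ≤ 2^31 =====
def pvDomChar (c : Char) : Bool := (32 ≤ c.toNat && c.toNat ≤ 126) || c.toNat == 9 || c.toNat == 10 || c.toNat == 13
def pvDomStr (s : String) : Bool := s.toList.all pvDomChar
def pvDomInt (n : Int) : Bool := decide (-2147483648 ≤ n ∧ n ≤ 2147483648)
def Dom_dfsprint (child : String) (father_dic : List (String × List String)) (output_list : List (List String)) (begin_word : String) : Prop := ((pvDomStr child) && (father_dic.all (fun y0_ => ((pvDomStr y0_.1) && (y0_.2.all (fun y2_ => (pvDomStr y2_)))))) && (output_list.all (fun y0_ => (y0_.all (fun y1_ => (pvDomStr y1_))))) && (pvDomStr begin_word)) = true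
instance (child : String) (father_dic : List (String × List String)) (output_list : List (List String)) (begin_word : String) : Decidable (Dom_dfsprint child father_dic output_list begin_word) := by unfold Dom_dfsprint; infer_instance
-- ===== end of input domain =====

-- B separates A's deepcopy-per-branch recursion into a pure tail-path enumerator plus one
-- cross-product comprehension (objective: simpler).  Both Pythons mutate output_list's inner
-- lists the same way (append child); the equivalence proved here is about the RETURN value.

-- ===== PORT A =====
-- The Python recursion has no structural decreasing argument, so both ports carry a fuel
-- counter (father_dic.length + 1), a pure totality guard: Pre_ (the father graph reachable
-- from child is acyclic and fully keyed) guarantees the recursion depth never exhausts it,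
-- and the dict lookup (KeyError in Python when missing) never misses.
def dfsprintFuel (fuel : Nat) (child : String) (father_dic : List (String × List String)) (output_list : List (List String)) (begin_word : String) : List (List String) :=
  -- for ite in output_list: ite.append(child)
  let output2 := output_list.map (fun ite => ite ++ [child])
  if child = begin_word then
    -- return_list.extend(output_list)
    output2
  else
    match fuel with
    | 0 => []   -- unreachable under Pre_ (fuel guard only)
    | fuel' + 1 =>
      -- for father in father_dic[child]: return_list.extend(dfsprint(father, ..., deepcopy(output_list), ...))
      ((PySem.Dict.mk father_dic).getD child []).foldl
        (fun return_list father =>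
          return_list ++ dfsprintFuel fuel' father father_dic output2 begin_word) []

def dfsprint (child : String) (father_dic : List (String × List String)) (output_list : List (List String)) (begin_word : String) : List (List String) :=
  dfsprintFuel (father_dic.length + 1) child father_dic output_list begin_word

-- ===== PORT B =====
def tailsFuel (fuel : Nat) (child : String) (father_dic : List (String × List String)) (begin_word : String) : List (List String) :=
  match fuel with
  | 0 => []   -- unreachable under Pre_ (fuel guard only)
  | fuel' + 1 =>
    ((PySem.Dict.mk father_dic).getD child []).foldl
      (fun result father =>
        if father = begin_word then result ++ [[father]]
        else result ++ (tailsFuel fuel' father father_dic begin_word).map (fun t => father :: t))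
      []

def dfsprint_alt (child : String) (father_dic : List (String × List String)) (output_list : List (List String)) (begin_word : String) : List (List String) :=
  let output2 := output_list.map (fun ite => ite ++ [child])
  if child = begin_word then output2
  else (tailsFuel (father_dic.length + 1) child father_dic begin_word).flatMap
         (fun tail => output2.map (fun pfx => pfx ++ tail))

-- ===== PRECONDITION & SPEC =====
-- Graph helpers for Pre_: pvStep expands every non-begin_word node to its fathers, and
-- pvReach d bw n s collects everything reachable from s in at most n such steps.
def pvStep (d : List (String × List String)) (bw : String) (s : List String) : List String :=
  s.flatMap (fun k => if k = bw then [] else (PySem.Dict.mk d).getD k [])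

def pvReach (d : List (String × List String)) (bw : String) : Nat → List String → List String
  | 0, s => s
  | n + 1, s => s ++ pvReach d bw n (pvStep d bw s)

-- Pre_ excludes exactly the inputs on which Python A does not return: a word reachable from
-- child that is neither begin_word nor a dict key (KeyError), or a father-pointer cycle
-- reachable from child (unbounded recursion); it also requires distinct keys, because an
-- association list with duplicate keys models no single Python dict (first-match vs last-wins
-- are both defensible there).  Unreachable parts of the dict are unconstrained.
def Pre_dfsprint (child : String) (father_dic : List (String × List String)) (output_list : List (List String)) (begin_word : String) : Prop :=
  (father_dic.map Prod.fst).Nodup ∧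
  (∀ k ∈ pvReach father_dic begin_word (father_dic.length + 1) [child],
     k = begin_word ∨ k ∈ father_dic.map Prod.fst) ∧
  (∀ k ∈ pvReach father_dic begin_word (father_dic.length + 1) [child],
     k ≠ begin_word → k ∉ pvReach father_dic begin_word father_dic.length (pvStep father_dic begin_word [k]))
instance (child : String) (father_dic : List (String × List String)) (output_list : List (List String)) (begin_word : String) : Decidable (Pre_dfsprint child father_dic output_list begin_word) := by unfold Pre_dfsprint; infer_instance

def pvWitness_dfsprint : String × (List (String × List String)) × List (List String) × String :=
  ("c", [("b", ["s"]), ("c", ["b", "s"])], [["p"]], "s")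

def Spec_dfsprint (child : String) (father_dic : List (String × List String)) (output_list : List (List String)) (begin_word : String) (out : List (List String)) : Prop := out = dfsprint_alt child father_dic output_list begin_word
instance (child : String) (father_dic : List (String × List String)) (output_list : List (List String)) (begin_word : String) (out : List (List String)) : Decidable (Spec_dfsprint child father_dic output_list begin_word out) := by unfold Spec_dfsprint; infer_instance

-- ===== CLAIM (what is proved, stated in full; the proofs are below) =====
def Claim_equal_dfsprint : Prop := ∀ (child : String) (father_dic : List (String × List String)) (output_list : List (List String)) (begin_word : String), Dom_dfsprint child father_dic output_list begin_word → Pre_dfsprint child father_dic output_list begin_word → Spec_dfsprint child father_dic output_list begin_word (dfsprint child father_dic output_list begin_word)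

-- ===== LEMMAS AND PROOFS =====

-- Complete paths [child, ..., begin_word]: the bridge between the two recursions.
def chainsFuel (fuel : Nat) (child : String) (father_dic : List (String × List String)) (begin_word : String) : List (List String) :=
  if child = begin_word then [[child]]
  else
    match fuel with
    | 0 => []
    | fuel' + 1 =>
      ((PySem.Dict.mk father_dic).getD child []).flatMap
        (fun father => (chainsFuel fuel' father father_dic begin_word).map (fun c => child :: c))

-- A's recursion = chains × prefixes (unconditionally, at matching fuel).
theorem dfsprintFuel_eq_chains (fuel : Nat) (father_dic : List (String × List String))
    (begin_word : String) :
    ∀ (child : String) (output_list : List (List String)),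
      dfsprintFuel fuel child father_dic output_list begin_word =
        (chainsFuel fuel child father_dic begin_word).flatMap
          (fun c => output_list.map (fun p => p ++ c)) := by
  induction fuel with
  | zero =>
    intro child output_list
    by_cases h : child = begin_word <;>
      simp [dfsprintFuel, chainsFuel, h]
  | succ fuel' ih =>
    intro child output_list
    by_cases h : child = begin_word
    · simp [dfsprintFuel, chainsFuel, h]
    · simp only [dfsprintFuel, chainsFuel, if_neg h]
      rw [PySem.List.foldl_append_eq_flatMap]
      simp only [List.nil_append, List.flatMap_assoc, List.flatMap_map, ih, List.map_map]
      congr 1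
      funext fa
      congr 1
      funext c
      congr 1
      funext p
      simp

-- B's branch-in-the-loop fold, flattened.
theorem foldl_if_extend (bw : String) (m : String → List (List String)) :
    ∀ (l : List String) (acc : List (List String)),
      l.foldl (fun r fa => if fa = bw then r ++ [[fa]] else r ++ m fa) acc
        = acc ++ l.flatMap (fun fa => if fa = bw then [[fa]] else m fa) := by
  intro l
  induction l with
  | nil => intro acc; simp
  | cons fa rest ih =>
    intro acc
    by_cases hfa : fa = bw <;> simp [hfa, ih, List.append_assoc]

-- chains = child :: tails when child ≠ begin_word (at matching fuel).
theorem chainsFuel_eq_tails (father_dic : List (String × List String)) (begin_word : String) :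
    ∀ (fuel : Nat) (child : String), child ≠ begin_word →
      chainsFuel fuel child father_dic begin_word =
        (tailsFuel fuel child father_dic begin_word).map (fun t => child :: t) := by
  intro fuel
  induction fuel with
  | zero => intro child h; simp [chainsFuel, tailsFuel, h]
  | succ fuel' ih =>
    intro child h
    simp only [chainsFuel, tailsFuel, if_neg h]
    rw [foldl_if_extend]
    simp only [List.nil_append, List.map_flatMap]
    apply List.flatMap_congr
    intro fa _
    by_cases hfa : fa = begin_word
    · subst hfa; cases fuel' <;> simp [chainsFuel]
    · simp only [if_neg hfa, ih fa hfa]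

-- ===== VERDICT (by name: the statement is the Claim_ definition above) =====
theorem dfsprint_spec : Claim_equal_dfsprint := by
  intro child father_dic output_list begin_word _ _
  unfold Spec_dfsprint dfsprint dfsprint_alt
  by_cases h : child = begin_word
  · simp [dfsprintFuel, h]
  · simp only [if_neg h]
    rw [dfsprintFuel_eq_chains, chainsFuel_eq_tails father_dic begin_word _ _ h]
    simp only [List.flatMap_map, List.map_map]
    apply List.flatMap_congr
    intro t _
    apply List.map_congr_left
    intro p _
    simp
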